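-- pv_equiv track=rewrite | github.com/adamschmideg/learn | hackerrank/max_elem.py | solution
-- ===== SOURCE A (Python) =====
-- def solution(ops):
--     stack = []
--     counts = {}
--     maxis = []
--     result = []
--     for op in ops:
--         if op[0] == 1:
--             v = op[1]
--             stack.append(v)
--             counts[v] = counts.get(v, 0) + 1
--             if not maxis or maxis[-1] < v:
--                 maxis.append(v)
--         elif op[0] == 2:
--             if stack:
--                 v = stack.pop()
--                 counts[v] = counts[v] - 1
--                 if maxis and maxis[-1] == v and counts[v] == 0:
--                     maxis.pop()
--         else:
--             if maxis:
--                 result.append(maxis[-1])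
--     return result
-- ===== SOURCE B (Python) =====
-- def solution(ops):
--     # One stack of (value, running_max) pairs replaces A's stack + counts dict + max-marker stack.
--     stack = []
--     result = []
--     for op in ops:
--         if op[0] == 1:
--             v = op[1]
--             m = v if not stack else max(v, stack[-1][1])
--             stack.append((v, m))
--         elif op[0] == 2:
--             if stack:
--                 stack.pop()
--         else:
--             if stack:
--                 result.append(stack[-1][1])
--     return result
-- ===== Notes on version B (the rewrite author's own statement) =====
-- stated objective: simpler
-- what changed: Replaced A's three structures (value stack, occurrence-counts dict, compressed max-marker stack with a conditional marker pop) by a single stack of (value, running_max) pairs; queries read the top pair's max directly.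
import Mathlib
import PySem

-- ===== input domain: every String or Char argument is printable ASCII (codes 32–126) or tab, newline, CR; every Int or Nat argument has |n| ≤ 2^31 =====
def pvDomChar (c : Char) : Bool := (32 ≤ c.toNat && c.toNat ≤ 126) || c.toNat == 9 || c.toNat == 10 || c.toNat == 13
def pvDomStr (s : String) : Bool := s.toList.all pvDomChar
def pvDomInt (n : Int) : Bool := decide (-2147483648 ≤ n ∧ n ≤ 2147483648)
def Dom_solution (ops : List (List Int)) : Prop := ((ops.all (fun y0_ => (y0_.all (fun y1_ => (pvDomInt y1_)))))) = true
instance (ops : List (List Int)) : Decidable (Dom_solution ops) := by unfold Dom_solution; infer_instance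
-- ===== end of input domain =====

-- B replaces A's three structures (value stack, counts dict, compressed max-marker stack) by one
-- stack of (value, running_max) pairs: simpler, same cost. Equivalence of return values proved below.

-- ===== PORT A =====
-- state: (stack, counts, maxis, result)
def solA_step (acc : List Int × PySem.Dict Int Int × List Int × List Int) (op : List Int) :
    List Int × PySem.Dict Int Int × List Int × List Int :=
  let stack := acc.1
  let counts := acc.2.1
  let maxis := acc.2.2.1
  let result := acc.2.2.2
  if op.headD 0 = 1 then                -- op[0] == 1 (op ≠ [] under Pre_)
    let v := (op.drop 1).headD 0        -- op[1] (present under Pre_)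
    let stack := stack ++ [v]
    let counts := counts.insert v (counts.getD v 0 + 1)   -- counts[v] = counts.get(v, 0) + 1
    let maxis := if maxis = [] ∨ maxis.getLastD 0 < v then maxis ++ [v] else maxis
    (stack, counts, maxis, result)
  else if op.headD 0 = 2 then
    if stack = [] then acc
    else
      let v := stack.getLastD 0         -- v = stack.pop()  (stack nonempty here)
      let stack := stack.dropLast
      -- counts[v] - 1: key v is always present here, since v was popped off the stack
      let counts := counts.insert v (counts.getD v 0 - 1)
      let maxis := if maxis ≠ [] ∧ maxis.getLastD 0 = v ∧ counts.getD v 0 = 0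
                   then maxis.dropLast else maxis
      (stack, counts, maxis, result)
  else
    if maxis = [] then acc else (stack, counts, maxis, result ++ [maxis.getLastD 0])

def solution (ops : List (List Int)) : List Int :=
  (ops.foldl solA_step ([], PySem.Dict.empty, [], [])).2.2.2

-- ===== PORT B =====
-- state: (stack of (value, running max), result)
def solB_step (acc : List (Int × Int) × List Int) (op : List Int) :
    List (Int × Int) × List Int :=
  if op.headD 0 = 1 then
    let v := (op.drop 1).headD 0
    let m := if acc.1 = [] then v else max v (acc.1.getLastD (0, 0)).2
    (acc.1 ++ [(v, m)], acc.2)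
  else if op.headD 0 = 2 then
    if acc.1 = [] then acc else (acc.1.dropLast, acc.2)
  else
    if acc.1 = [] then acc else (acc.1, acc.2 ++ [(acc.1.getLastD (0, 0)).2])

def solution_alt (ops : List (List Int)) : List Int :=
  (ops.foldl solB_step ([], [])).2

-- ===== PRECONDITION & SPEC =====
-- Pre_ excludes exactly the inputs on which Python A raises IndexError: an op that is the
-- empty list (op[0]) or a push op [1] without its value (op[1]).
def Pre_solution (ops : List (List Int)) : Prop :=
  ∀ op ∈ ops, op ≠ [] ∧ (op.headD 0 = 1 → 2 ≤ op.length)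
instance (ops : List (List Int)) : Decidable (Pre_solution ops) := by
  unfold Pre_solution; infer_instance
def pvWitness_solution : List (List Int) := [[1, 5], [1, 2], [3], [2], [3]]

def Spec_solution (ops : List (List Int)) (out : List Int) : Prop := out = solution_alt ops
instance (ops : List (List Int)) (out : List Int) : Decidable (Spec_solution ops out) := by unfold Spec_solution; infer_instance

-- ===== CLAIM (what is proved, stated in full; the proofs are below) =====
def Claim_equal_solution : Prop := ∀ (ops : List (List Int)), Dom_solution ops → Pre_solution ops → Spec_solution ops (solution ops)

-- ===== LEMMAS AND PROOFS =====

-- the step A performs on maxis at a push, and maxis as a function of the value stack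
def recStep (m : List Int) (v : Int) : List Int :=
  if m = [] ∨ m.getLastD 0 < v then m ++ [v] else m

def records (s : List Int) : List Int := s.foldl recStep []

-- the step B performs on its pair stack at a push, and B's stack as a function of the value stack
def annStep (b : List (Int × Int)) (v : Int) : List (Int × Int) :=
  b ++ [(v, if b = [] then v else max v (b.getLastD (0, 0)).2)]

def ann (s : List Int) : List (Int × Int) := s.foldl annStep []

theorem records_snoc (s : List Int) (v : Int) :
    records (s ++ [v]) = recStep (records s) v := by
  simp [records, List.foldl_append]

theorem ann_snoc (s : List Int) (v : Int) :
    ann (s ++ [v]) = annStep (ann s) v := by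
  simp [ann, List.foldl_append]

theorem records_eq_nil (s : List Int) : records s = [] ↔ s = [] := by
  induction s using List.reverseRecOn with
  | nil => simp [records]
  | append_singleton t v ih =>
      rw [records_snoc]
      unfold recStep
      split_ifs with h
      · simp
      · push_neg at h
        simp [h.1]

theorem ann_eq_nil (s : List Int) : ann s = [] ↔ s = [] := by
  induction s using List.reverseRecOn with
  | nil => simp [ann]
  | append_singleton t v ih => rw [ann_snoc]; unfold annStep; simp

theorem last_records_ann (s : List Int) :
    (records s).getLastD 0 = ((ann s).getLastD (0, 0)).2 := by
  induction s using List.reverseRecOn with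
  | nil => simp [records, ann]
  | append_singleton t v ih =>
      rw [records_snoc, ann_snoc]
      unfold recStep annStep
      by_cases ht : t = []
      · subst ht; simp [records, ann]
      · have hrt : records t ≠ [] := fun hh => ht ((records_eq_nil t).mp hh)
        have hat : ann t ≠ [] := fun hh => ht ((ann_eq_nil t).mp hh)
        rw [if_neg hat]
        by_cases hlt : (records t).getLastD 0 < v
        · rw [if_pos (Or.inr hlt), List.getLastD_concat, List.getLastD_concat]
          rw [ih] at hlt
          exact (max_eq_left (le_of_lt hlt)).symm
        · rw [if_neg (by push_neg; exact ⟨hrt, not_lt.mp hlt⟩), List.getLastD_concat]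
          have hv : v ≤ ((ann t).getLastD (0, 0)).2 := ih ▸ not_lt.mp hlt
          rw [max_eq_right hv, ← ih]

theorem le_last_records (s : List Int) : ∀ x ∈ s, x ≤ (records s).getLastD 0 := by
  induction s using List.reverseRecOn with
  | nil => intro x hx; cases hx
  | append_singleton t v ih =>
      intro x hx
      rw [records_snoc]
      unfold recStep
      split_ifs with h
      · rw [List.getLastD_concat]
        rcases List.mem_append.mp hx with hx | hx
        · rcases h with h | h
          · rw [(records_eq_nil t).mp h] at hx; cases hx
          · exact le_of_lt (lt_of_le_of_lt (ih x hx) h)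
        · simp at hx; omega
      · push_neg at h
        rcases List.mem_append.mp hx with hx | hx
        · exact ih x hx
        · simp at hx; exact hx ▸ h.2

theorem last_records_mem (s : List Int) (hs : s ≠ []) :
    (records s).getLastD 0 ∈ s := by
  induction s using List.reverseRecOn with
  | nil => exact absurd rfl hs
  | append_singleton t v ih =>
      rw [records_snoc]
      unfold recStep
      split_ifs with h
      · simp
      · push_neg at h
        have ht : t ≠ [] := fun hh => h.1 ((records_eq_nil t).mpr hh)
        exact List.mem_append.mpr (Or.inl (ih ht))

theorem loop_eq (ops : List (List Int)) :
    ∀ (s : List Int) (c : PySem.Dict Int Int) (r : List Int),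
      (∀ v, c.getD v 0 = (s.count v : Int)) →
      (ops.foldl solA_step (s, c, records s, r)).2.2.2
        = (ops.foldl solB_step (ann s, r)).2 := by
  induction ops with
  | nil => intro s c r _; rfl
  | cons op ops ih =>
      intro s c r hc
      rw [List.foldl_cons, List.foldl_cons]
      by_cases h1 : op.headD 0 = 1
      · -- push branch
        have hA : solA_step (s, c, records s, r) op
            = (s ++ [(op.drop 1).headD 0],
               c.insert ((op.drop 1).headD 0) (c.getD ((op.drop 1).headD 0) 0 + 1),
               records (s ++ [(op.drop 1).headD 0]), r) := by
          simp only [solA_step]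
          rw [if_pos h1]
          simp only [records_snoc, recStep]
        have hB : solB_step (ann s, r) op = (ann (s ++ [(op.drop 1).headD 0]), r) := by
          simp only [solB_step]
          rw [if_pos h1]
          simp only [ann_snoc, annStep]
        rw [hA, hB]
        apply ih
        intro w
        rw [PySem.Dict.getD_insert]
        by_cases hw : w = (op.drop 1).headD 0
        · subst hw
          rw [if_pos rfl, hc]
          simp [List.count_append]
        · rw [if_neg hw, hc]
          have hw' : ¬((op.drop 1).headD 0) = w := fun hh => hw hh.symm
          simp [List.count_append, List.count_singleton]
          simp at hw'
          exact hw'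
      · by_cases h2 : op.headD 0 = 2
        · -- pop branch
          rcases List.eq_nil_or_concat' s with hs | ⟨t, v, hs⟩
          · subst hs
            have hA : solA_step (([] : List Int), c, records ([] : List Int), r) op
                = (([] : List Int), c, records ([] : List Int), r) := by
              simp only [solA_step]
              rw [if_neg h1, if_pos h2]
              simp
            have hB : solB_step (ann [], r) op = (ann [], r) := by
              simp only [solB_step]
              rw [if_neg h1, if_pos h2]
              simp [ann]
            rw [hA, hB]; exact ih [] c r hc
          · subst hs
            have hcv : (c.insert v (c.getD v 0 - 1)).getD v 0 = (t.count v : Int) := by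
              rw [PySem.Dict.getD_insert, if_pos rfl, hc]
              simp [List.count_append]
            have hM : (if ¬records (t ++ [v]) = [] ∧ (records (t ++ [v])).getLastD 0 = v ∧
                          (c.insert v (c.getD v 0 - 1)).getD v 0 = 0
                       then (records (t ++ [v])).dropLast else records (t ++ [v]))
                = records t := by
              rw [records_snoc]
              unfold recStep
              split_ifs with hcond hpop hpop
              · exact List.dropLast_concat
              · exfalso
                apply hpop
                refine ⟨by simp, List.getLastD_concat, ?_⟩
                rw [hcv]
                rcases hcond with hc0 | hlt
                · rw [(records_eq_nil t).mp hc0]; simp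
                · have hnm : v ∉ t := fun hvm =>
                    absurd (le_last_records t v hvm) (not_le.mpr hlt)
                  simp [List.count_eq_zero.mpr hnm]
              · exfalso
                push_neg at hcond
                obtain ⟨-, hlast, hzero⟩ := hpop
                have ht : t ≠ [] := fun hh => hcond.1 ((records_eq_nil t).mpr hh)
                have hvmem : v ∈ t := hlast ▸ last_records_mem t ht
                rw [hcv] at hzero
                have hcnt : t.count v ≠ 0 := fun hh =>
                  (List.count_eq_zero.mp hh) hvmem
                omega
              · rfl
            have hne : ¬(t ++ [v] = ([] : List Int)) := by simp
            have hA : solA_step (t ++ [v], c, records (t ++ [v]), r) op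
                = (t, c.insert v (c.getD v 0 - 1), records t, r) := by
              simp only [solA_step]
              rw [if_neg h1, if_pos h2, if_neg hne]
              simp only [List.getLastD_concat, List.dropLast_concat]
              rw [hM]
            have hB : solB_step (ann (t ++ [v]), r) op = (ann t, r) := by
              have hbne : ¬(ann (t ++ [v]) = []) := fun hh => by
                simpa using (ann_eq_nil _).mp hh
              simp only [solB_step]
              rw [if_neg h1, if_pos h2, if_neg hbne]
              rw [ann_snoc]
              unfold annStep
              rw [List.dropLast_concat]
            rw [hA, hB]
            apply ih
            intro w
            rw [PySem.Dict.getD_insert]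
            by_cases hw : w = v
            · subst hw
              rw [if_pos rfl, hc]
              simp [List.count_append]
            · rw [if_neg hw, hc]
              have hw' : ¬v = w := fun hh => hw hh.symm
              simp [List.count_append, List.count_singleton, hw']
        · -- query branch
          by_cases hs : s = []
          · subst hs
            have hA : solA_step (([] : List Int), c, records ([] : List Int), r) op
                = (([] : List Int), c, records ([] : List Int), r) := by
              simp only [solA_step]
              rw [if_neg h1, if_neg h2]
              simp [records]
            have hB : solB_step (ann [], r) op = (ann [], r) := by
              simp only [solB_step]
              rw [if_neg h1, if_neg h2]
              simp [ann]
            rw [hA, hB]; exact ih [] c r hc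
          · have hm : records s ≠ [] := fun hh => hs ((records_eq_nil s).mp hh)
            have hb : ann s ≠ [] := fun hh => hs ((ann_eq_nil s).mp hh)
            have hA : solA_step (s, c, records s, r) op
                = (s, c, records s, r ++ [(records s).getLastD 0]) := by
              simp only [solA_step]
              rw [if_neg h1, if_neg h2, if_neg hm]
            have hB : solB_step (ann s, r) op
                = (ann s, r ++ [((ann s).getLastD (0, 0)).2]) := by
              simp only [solB_step]
              rw [if_neg h1, if_neg h2, if_neg hb]
            rw [hA, hB, last_records_ann]
            exact ih s c _ hc

-- ===== VERDICT (by name: the statement is the Claim_ definition above) =====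
theorem solution_spec : Claim_equal_solution := by
  intro ops _ _
  unfold Spec_solution solution solution_alt
  have h := loop_eq ops [] PySem.Dict.empty []
    (by intro v; simp [PySem.Dict.getD_empty])
  simpa [records, ann] using h
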